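-- pv_equiv track=rewrite | github.com/davidaugustat/AdventOfCode2023 | day3/day3.py | is_number_adjacent_to
-- ===== SOURCE A (Python) =====
-- def is_number_adjacent_to(num_pos_info, star_i, star_j, schematic):
--     i, j, num_string = num_pos_info
--     r = len(schematic)
--     c = len(schematic[0])
--
--     for k in range(j, j + len(num_string)):
--         potential_indices = [(i-1, k), (i+1, k), (i, k-1), (i, k+1), (i-1, k-1), (i-1, k+1), (i+1, k-1), (i+1, k+1)]
--         for pot_i, pot_j in potential_indices:
--             if pot_i < 0 or pot_i >= r or pot_j < 0 or pot_j >= c: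
--                 continue
--             if pot_i == star_i and pot_j == star_j:
--                 return True
--     return False
-- ===== SOURCE B (Python) =====
-- def is_number_adjacent_to(num_pos_info, star_i, star_j, schematic):
--     # O(1) bounding-box check instead of scanning every digit's 8 neighbours.
--     i, j, num_string = num_pos_info
--     r = len(schematic)
--     c = len(schematic[0])
--     n = len(num_string)
--     if n == 0:
--         return False
--     if not (0 <= star_i < r and 0 <= star_j < c):
--         return False
--     if not (i - 1 <= star_i <= i + 1 and j - 1 <= star_j <= j + n):
--         return False
--     # the only cell of the bounding box never adjacent to a digit:
--     # the centre itself, reachable only when the number has a single digit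
--     if star_i == i and star_j == j and n == 1:
--         return False
--     return True
-- ===== Notes on version B (the rewrite author's own statement) =====
-- stated objective: faster
-- what changed: Replaces the per-digit scan over all 8 neighbour offsets with a single O(1) bounding-box comparison, special-casing the centre cell of a length-1 number.
import Mathlib
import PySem

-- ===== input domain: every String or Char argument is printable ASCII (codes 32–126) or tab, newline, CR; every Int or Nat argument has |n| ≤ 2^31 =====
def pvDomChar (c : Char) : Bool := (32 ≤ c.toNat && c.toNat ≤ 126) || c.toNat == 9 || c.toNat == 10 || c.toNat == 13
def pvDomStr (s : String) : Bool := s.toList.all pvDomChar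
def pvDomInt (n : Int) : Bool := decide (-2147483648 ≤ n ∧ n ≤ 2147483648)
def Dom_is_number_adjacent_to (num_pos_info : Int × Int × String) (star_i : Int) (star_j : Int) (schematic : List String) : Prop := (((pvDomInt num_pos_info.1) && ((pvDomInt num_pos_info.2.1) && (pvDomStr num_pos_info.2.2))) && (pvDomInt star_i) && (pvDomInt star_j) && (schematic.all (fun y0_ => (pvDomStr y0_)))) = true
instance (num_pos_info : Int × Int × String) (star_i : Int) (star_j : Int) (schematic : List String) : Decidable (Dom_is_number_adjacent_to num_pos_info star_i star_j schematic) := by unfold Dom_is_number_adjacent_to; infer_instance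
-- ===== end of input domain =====

-- B replaces A's per-digit scan of the 8 neighbour offsets by one O(1) bounding-box comparison
-- (with the centre-cell exception for a one-digit number); proved equal whenever schematic ≠ [].

-- ===== PORT A =====
-- inner body of A's double loop: for one digit column k, scan the 8 neighbour
-- candidates in A's order, skipping out-of-bounds ones ('continue' → false)
def pvCheckCandidates (r c star_i star_j : Int) (cands : List (Int × Int)) : Bool :=
  cands.any (fun p =>
    if p.1 < 0 ∨ p.1 ≥ r ∨ p.2 < 0 ∨ p.2 ≥ c then false
    else decide (p.1 = star_i ∧ p.2 = star_j))

def is_number_adjacent_to (num_pos_info : Int × Int × String) (star_i : Int) (star_j : Int) (schematic : List String) : Bool :=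
  match num_pos_info with
  | (i, j, num_string) =>
    let r : Int := schematic.length
    -- len(schematic[0]); raises on [], excluded by Pre_
    let c : Int := (schematic.headD "").toList.length
    (PySem.List.pyRange j (j + num_string.toList.length) 1).any (fun k =>
      pvCheckCandidates r c star_i star_j
        [(i-1, k), (i+1, k), (i, k-1), (i, k+1),
         (i-1, k-1), (i-1, k+1), (i+1, k-1), (i+1, k+1)])

-- ===== PORT B =====
def is_number_adjacent_to_alt (num_pos_info : Int × Int × String) (star_i : Int) (star_j : Int) (schematic : List String) : Bool :=
  match num_pos_info with
  | (i, j, num_string) =>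
    let r : Int := schematic.length
    let c : Int := (schematic.headD "").toList.length
    let n : Int := num_string.toList.length
    if n = 0 then false
    else if ¬ (0 ≤ star_i ∧ star_i < r ∧ 0 ≤ star_j ∧ star_j < c) then false
    else if ¬ (i - 1 ≤ star_i ∧ star_i ≤ i + 1 ∧ j - 1 ≤ star_j ∧ star_j ≤ j + n) then false
    else if star_i = i ∧ star_j = j ∧ n = 1 then false
    else true

-- ===== PRECONDITION & SPEC =====
-- Pre_ excludes only the empty schematic, on which A raises IndexError at len(schematic[0]).
def Pre_is_number_adjacent_to (num_pos_info : Int × Int × String) (star_i : Int) (star_j : Int) (schematic : List String) : Prop := schematic ≠ []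
instance (num_pos_info : Int × Int × String) (star_i : Int) (star_j : Int) (schematic : List String) : Decidable (Pre_is_number_adjacent_to num_pos_info star_i star_j schematic) := by unfold Pre_is_number_adjacent_to; infer_instance

def pvWitness_is_number_adjacent_to : (Int × Int × String) × Int × Int × List String := ((0, 0, "12"), 1, 1, ["12.", ".*."])

def Spec_is_number_adjacent_to (num_pos_info : Int × Int × String) (star_i : Int) (star_j : Int) (schematic : List String) (out : Bool) : Prop := out = is_number_adjacent_to_alt num_pos_info star_i star_j schematic
instance (num_pos_info : Int × Int × String) (star_i : Int) (star_j : Int) (schematic : List String) (out : Bool) : Decidable (Spec_is_number_adjacent_to num_pos_info star_i star_j schematic out) := by unfold Spec_is_number_adjacent_to; infer_instance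

-- ===== CLAIM (what is proved, stated in full; the proofs are below) =====
def Claim_equal_is_number_adjacent_to : Prop := ∀ (num_pos_info : Int × Int × String) (star_i : Int) (star_j : Int) (schematic : List String), Dom_is_number_adjacent_to num_pos_info star_i star_j schematic → Pre_is_number_adjacent_to num_pos_info star_i star_j schematic → Spec_is_number_adjacent_to num_pos_info star_i star_j schematic (is_number_adjacent_to num_pos_info star_i star_j schematic)

-- ===== LEMMAS AND PROOFS =====

lemma pv_ite_false_decide {c p : Prop} [Decidable c] [Decidable p] :
    ((if c then false else decide p) = true) ↔ (¬ c ∧ p) := by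
  split_ifs with h <;> simp [h]

-- the inner candidate scan, as a proposition
lemma pvCheckCandidates_iff (r c si sj i k : Int) :
    pvCheckCandidates r c si sj
        [(i-1, k), (i+1, k), (i, k-1), (i, k+1),
         (i-1, k-1), (i-1, k+1), (i+1, k-1), (i+1, k+1)] = true ↔
      (0 ≤ si ∧ si < r ∧ 0 ≤ sj ∧ sj < c ∧
       i - 1 ≤ si ∧ si ≤ i + 1 ∧ k - 1 ≤ sj ∧ sj ≤ k + 1 ∧ ¬ (si = i ∧ sj = k)) := by
  unfold pvCheckCandidates
  rw [List.any_eq_true]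
  constructor
  · rintro ⟨⟨a, b⟩, hmem, hp⟩
    rw [pv_ite_false_decide] at hp
    simp only [List.mem_cons, List.not_mem_nil, or_false, Prod.mk.injEq] at hmem
    obtain ⟨hc, h1, h2⟩ := hp
    rcases hmem with ⟨ha, hb⟩ | ⟨ha, hb⟩ | ⟨ha, hb⟩ | ⟨ha, hb⟩ | ⟨ha, hb⟩ | ⟨ha, hb⟩ | ⟨ha, hb⟩ | ⟨ha, hb⟩ <;>
      (subst ha hb; refine ⟨by omega, by omega, by omega, by omega, by omega, by omega, by omega, by omega, by omega⟩)
  · rintro ⟨hb1, hb2, hb3, hb4, hr1, hr2, hk1, hk2, hne⟩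
    refine ⟨(si, sj), ?_, ?_⟩
    · simp only [List.mem_cons, List.not_mem_nil, or_false, Prod.mk.injEq]
      omega
    · rw [pv_ite_false_decide]
      exact ⟨by omega, rfl, rfl⟩

-- A's outer loop over the digit columns, as a proposition (induction on the digit count)
lemma pvLoop_iff (r c si sj i : Int) (n : Nat) : ∀ j : Int,
    ((PySem.List.pyRange j (j + n) 1).any (fun k =>
      pvCheckCandidates r c si sj
        [(i-1, k), (i+1, k), (i, k-1), (i, k+1),
         (i-1, k-1), (i-1, k+1), (i+1, k-1), (i+1, k+1)])) = true ↔
      (0 ≤ si ∧ si < r ∧ 0 ≤ sj ∧ sj < c ∧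
       i - 1 ≤ si ∧ si ≤ i + 1 ∧ j - 1 ≤ sj ∧ sj ≤ j + n ∧ 1 ≤ n ∧
       ¬ (si = i ∧ sj = j ∧ n = 1)) := by
  induction n with
  | zero =>
    intro j
    rw [PySem.List.pyRange_one_eq_nil (by omega)]
    simp only [List.any_nil, Bool.false_eq_true, false_iff]
    omega
  | succ m ih =>
    intro j
    rw [show j + ((m + 1 : Nat) : Int) = (j + 1) + (m : Int) by push_cast; ring,
        PySem.List.pyRange_one_cons (by omega)]
    simp only [List.any_cons, Bool.or_eq_true, pvCheckCandidates_iff, ih]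
    omega

-- ===== VERDICT (by name: the statement is the Claim_ definition above) =====
theorem is_number_adjacent_to_spec : Claim_equal_is_number_adjacent_to := by
  rintro ⟨i, j, s⟩ si sj sch _hDom _hPre
  unfold Spec_is_number_adjacent_to
  simp only [is_number_adjacent_to, is_number_adjacent_to_alt]
  rw [Bool.eq_iff_iff, pvLoop_iff]
  split_ifs with h1 h2 h3 h4 <;> simp only [Bool.true_eq_false, Bool.false_eq_true,
    iff_false, iff_true, not_and, not_or, not_lt, not_le] at * <;> omega
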